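-- pv_equiv track=rewrite | github.com/Bears-R-Us/arkouda-njit | arachne/tests/random_generators_test.py | isExpectedEdgeSet
-- ===== SOURCE A (Python) =====
-- def isExpectedEdgeSet(edge_set_to_compare):
--     expected_edge_sets = [
--     [],  # No edges.
--     [(0, 1)],  # 0 → 1
--     [(1, 0)],  # 1 → 0
--     [(0, 1), (1, 0)],  # 0 ↔ 1 (Bidirectional edge between 0 and 1)
--     [(0, 0)],  # 0 → 0 (Self-loop at 0)
--     [(1, 1)],  # 1 → 1 (Self-loop at 1)
--     [(0, 0), (0, 1)],  # 0 → 0, 0 → 1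
--     [(0, 0), (1, 0)],  # 0 → 0, 1 → 0
--     [(0, 0), (0, 1), (1, 0)],  # 0 → 0, 0 ↔ 1
--     [(1, 1), (0, 1)],  # 1 → 1, 0 → 1
--     [(1, 1), (1, 0)],  # 1 → 1, 1 → 0
--     [(1, 1), (0, 1), (1, 0)],  # 1 → 1, 0 ↔ 1
--     [(0, 0), (1, 1)],  # 0 → 0, 1 → 1
--     [(0, 0), (1, 1), (0, 1)],  # 0 → 0, 1 → 1, 0 → 1
--     [(0, 0), (1, 1), (1, 0)],  # 0 → 0, 1 → 1, 1 → 0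
--     [(0, 0), (1, 1), (0, 1), (1, 0)],  # 0 → 0, 1 → 1, 0 ↔ 1
--     ]
--     expected_edge_sets = [sorted(edge_set) for edge_set in expected_edge_sets]
--     for edge_set in expected_edge_sets:
--         if edge_set == sorted(edge_set_to_compare):
--             return True
--     return False
-- ===== SOURCE B (Python) =====
-- def isExpectedEdgeSet(edge_set_to_compare):
--     # Every expected set is exactly a duplicate-free subset of these four edges,
--     # so validate the sorted list element-wise instead of scanning 16 candidates.
--     valid_edges = [(0, 0), (0, 1), (1, 0), (1, 1)]
--     s = sorted(edge_set_to_compare)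
--     prev = None
--     for e in s:
--         if e not in valid_edges or e == prev:
--             return False
--         prev = e
--     return True
-- ===== Notes on version B (the rewrite author's own statement) =====
-- stated objective: simpler
-- what changed: Instead of sorting the input and comparing it against all 16 enumerated expected edge lists, B sorts once and makes a single pass checking that every edge is one of the four valid edges {(0,0),(0,1),(1,0),(1,1)} and that no adjacent (hence no) duplicates occur, which characterises exactly the 16 expected sets.
import Mathlib
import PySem

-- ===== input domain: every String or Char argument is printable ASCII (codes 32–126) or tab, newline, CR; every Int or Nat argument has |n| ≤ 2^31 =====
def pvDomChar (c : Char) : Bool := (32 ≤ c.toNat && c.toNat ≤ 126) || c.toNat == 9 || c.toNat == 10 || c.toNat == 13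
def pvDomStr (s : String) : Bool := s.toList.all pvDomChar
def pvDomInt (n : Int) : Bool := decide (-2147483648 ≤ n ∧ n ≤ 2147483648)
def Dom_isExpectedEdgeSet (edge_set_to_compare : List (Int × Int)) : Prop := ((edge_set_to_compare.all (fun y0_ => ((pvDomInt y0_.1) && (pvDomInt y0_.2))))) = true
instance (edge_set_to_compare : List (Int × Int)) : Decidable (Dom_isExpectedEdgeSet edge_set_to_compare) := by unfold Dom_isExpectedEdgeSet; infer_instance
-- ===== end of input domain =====

-- B replaces A's scan over 16 enumerated expected edge lists by a single pass over the
-- sorted input, checking each edge is one of the four valid edges and not a duplicate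
-- of its predecessor (objective: simpler).


-- ===== PORT A =====
def isExpectedEdgeSet (edge_set_to_compare : List (Int × Int)) : Bool :=
  let expected_edge_sets : List (List (Int × Int)) :=
    [ [],
      [(0, 1)],
      [(1, 0)],
      [(0, 1), (1, 0)],
      [(0, 0)],
      [(1, 1)],
      [(0, 0), (0, 1)],
      [(0, 0), (1, 0)],
      [(0, 0), (0, 1), (1, 0)],
      [(1, 1), (0, 1)],
      [(1, 1), (1, 0)],
      [(1, 1), (0, 1), (1, 0)],
      [(0, 0), (1, 1)],
      [(0, 0), (1, 1), (0, 1)],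
      [(0, 0), (1, 1), (1, 0)],
      [(0, 0), (1, 1), (0, 1), (1, 0)] ]
  let expected_edge_sets2 := expected_edge_sets.map
    (fun edge_set => PySem.List.sorted2 edge_set (fun p => p.1) (fun p => p.2) false)
  -- the for loop with an early 'return True' and a final 'return False'
  expected_edge_sets2.any (fun edge_set =>
    edge_set == PySem.List.sorted2 edge_set_to_compare (fun p => p.1) (fun p => p.2) false)

-- ===== PORT B =====
def pvValidEdges : List (Int × Int) := [(0, 0), (0, 1), (1, 0), (1, 1)]

-- the 'for e in s' loop with accumulator prev (None at the start)
def pvScan (prev : Option (Int × Int)) : List (Int × Int) → Bool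
  | [] => true
  | e :: t => if !(pvValidEdges.contains e) || (some e == prev) then false else pvScan (some e) t

def isExpectedEdgeSet_alt (edge_set_to_compare : List (Int × Int)) : Bool :=
  let s := PySem.List.sorted2 edge_set_to_compare (fun p => p.1) (fun p => p.2) false
  pvScan none s

-- ===== PRECONDITION & SPEC =====
def Spec_isExpectedEdgeSet (edge_set_to_compare : List (Int × Int)) (out : Bool) : Prop := out = isExpectedEdgeSet_alt edge_set_to_compare
instance (edge_set_to_compare : List (Int × Int)) (out : Bool) : Decidable (Spec_isExpectedEdgeSet edge_set_to_compare out) := by unfold Spec_isExpectedEdgeSet; infer_instance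

-- ===== CLAIM (what is proved, stated in full; the proofs are below) =====
def Claim_equal_isExpectedEdgeSet : Prop := ∀ (edge_set_to_compare : List (Int × Int)), Dom_isExpectedEdgeSet edge_set_to_compare → Spec_isExpectedEdgeSet edge_set_to_compare (isExpectedEdgeSet edge_set_to_compare)

-- ===== LEMMAS AND PROOFS =====

-- Python's lexicographic '<' on int pairs, as a Prop
def pvLt (a b : Int × Int) : Prop := a.1 < b.1 ∨ (a.1 = b.1 ∧ a.2 < b.2)

-- the comparison sorted2 uses, beta-reduced
def pvBefore (a b : Int × Int) : Bool :=
  decide (a.1 < b.1) || (!decide (b.1 < a.1) && decide (a.2 < b.2))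

theorem pvBefore_iff (a b : Int × Int) : pvBefore a b = true ↔ pvLt a b := by
  simp only [pvBefore, pvLt, Bool.or_eq_true, Bool.and_eq_true, Bool.not_eq_true',
    decide_eq_true_eq, decide_eq_false_iff_not]
  omega

theorem pvLt_trans {a b c : Int × Int} (h1 : pvLt a b) (h2 : pvLt b c) : pvLt a c := by
  unfold pvLt at *; omega

theorem pvLt_irrefl (a : Int × Int) : ¬ pvLt a a := by unfold pvLt; omega

theorem pvLt_asymm {a b : Int × Int} (h : pvLt a b) : ¬ pvLt b a := by
  unfold pvLt at *; omega

theorem pvLt_of_not_not {a b : Int × Int} (h1 : ¬ pvLt a b) (h2 : a ≠ b) : pvLt b a := by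
  rcases a with ⟨a1, a2⟩; rcases b with ⟨b1, b2⟩
  have h2' : a1 ≠ b1 ∨ a2 ≠ b2 := by
    rcases eq_or_ne a1 b1 with rfl | h
    · exact Or.inr (fun he => h2 (by rw [he]))
    · exact Or.inl h
  unfold pvLt at *
  rcases h2' with h | h <;> · simp only at * ; omega

-- insertion preserves the sortedness invariant
theorem pairwise_insertBy (x : Int × Int) (ys : List (Int × Int))
    (h : ys.Pairwise (fun a b => ¬ pvLt b a)) :
    (PySem.List.insertBy pvBefore x ys).Pairwise (fun a b => ¬ pvLt b a) := by
  induction ys with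
  | nil =>
    rw [show PySem.List.insertBy pvBefore x [] = [x] from rfl]
    simp
  | cons y ys ih =>
    rw [List.pairwise_cons] at h
    by_cases hb : pvBefore x y = true
    · have hxy : pvLt x y := (pvBefore_iff x y).mp hb
      rw [show PySem.List.insertBy pvBefore x (y :: ys) = x :: y :: ys from by rw [PySem.List.insertBy]; rw [if_pos hb]]
      refine List.Pairwise.cons ?_ (List.Pairwise.cons h.1 h.2)
      intro z hz
      rcases List.mem_cons.mp hz with rfl | hz'
      · exact pvLt_asymm hxy
      · intro hzx
        exact h.1 z hz' (pvLt_trans hzx hxy)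
    · have hxy : ¬ pvLt x y := fun hc => hb ((pvBefore_iff x y).mpr hc)
      rw [show PySem.List.insertBy pvBefore x (y :: ys) = y :: PySem.List.insertBy pvBefore x ys from by rw [PySem.List.insertBy]; rw [if_neg (by simp [hb])]]
      refine List.Pairwise.cons ?_ (ih h.2)
      intro z hz
      rcases (PySem.List.mem_insertBy pvBefore x z ys).mp hz with rfl | hz'
      · exact hxy
      · exact h.1 z hz'

theorem foldl_insertBy_pairwise (xs : List (Int × Int)) :
    ∀ acc : List (Int × Int), acc.Pairwise (fun a b => ¬ pvLt b a) →
    (xs.foldl (fun acc x => PySem.List.insertBy pvBefore x acc) acc).Pairwise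
      (fun a b => ¬ pvLt b a) := by
  induction xs with
  | nil => intro acc h; simpa using h
  | cons x xs ih =>
    intro acc h
    exact ih _ (pairwise_insertBy x acc h)

theorem sorted2_eq (xs : List (Int × Int)) :
    PySem.List.sorted2 xs (fun p => p.1) (fun p => p.2) false =
      xs.foldl (fun acc x => PySem.List.insertBy pvBefore x acc) [] := rfl

theorem sorted_pairwise_le (xs : List (Int × Int)) :
    (PySem.List.sorted2 xs (fun p => p.1) (fun p => p.2) false).Pairwise
      (fun a b => ¬ pvLt b a) := by
  rw [sorted2_eq]
  exact foldl_insertBy_pairwise xs [] (by simp)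

-- what a successful scan guarantees
theorem scan_mem : ∀ (s : List (Int × Int)) (prev : Option (Int × Int)),
    pvScan prev s = true → ∀ e ∈ s, e ∈ pvValidEdges := by
  intro s
  induction s with
  | nil => intro prev _ e he; simp at he
  | cons x t ih =>
    intro prev h e he
    rw [pvScan] at h
    by_cases hc : (!(pvValidEdges.contains x) || (some x == prev)) = true
    · rw [if_pos hc] at h; exact absurd h (by simp)
    · rw [if_neg hc] at h
      simp only [Bool.or_eq_true, Bool.not_eq_true', not_or] at hc
      rcases List.mem_cons.mp he with rfl | he'
      · exact List.contains_iff_mem.mp (by simpa using hc.1)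
      · exact ih (some x) h e he'

theorem scan_strict : ∀ (s : List (Int × Int)) (p : Int × Int),
    (p :: s).Pairwise (fun a b => ¬ pvLt b a) → pvScan (some p) s = true →
    (p :: s).Pairwise pvLt := by
  intro s
  induction s with
  | nil => intro p _ _; simp
  | cons e t ih =>
    intro p hle h
    rw [pvScan] at h
    by_cases hc : (!(pvValidEdges.contains e) || (some e == some p)) = true
    · rw [if_pos hc] at h; exact absurd h (by simp)
    · rw [if_neg hc] at h
      simp only [Bool.or_eq_true, Bool.not_eq_true', not_or, beq_iff_eq, Option.some.injEq] at hc
      have hne : e ≠ p := hc.2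
      rw [List.pairwise_cons] at hle
      have hpe : pvLt p e := pvLt_of_not_not (hle.1 e (List.mem_cons_self)) hne
      have htail : (e :: t).Pairwise pvLt := ih e hle.2 h
      refine List.Pairwise.cons ?_ htail
      intro z hz
      rcases List.mem_cons.mp hz with rfl | hz'
      · exact hpe
      · rw [List.pairwise_cons] at htail
        exact pvLt_trans hpe (htail.1 z hz')

theorem scan_pairwise (s : List (Int × Int))
    (hle : s.Pairwise (fun a b => ¬ pvLt b a)) (h : pvScan none s = true) :
    s.Pairwise pvLt := by
  cases s with
  | nil => simp
  | cons e t =>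
    rw [pvScan] at h
    by_cases hc : (!(pvValidEdges.contains e) || (some e == (none : Option (Int × Int)))) = true
    · rw [if_pos hc] at h; exact absurd h (by simp)
    · rw [if_neg hc] at h
      exact scan_strict t e hle h

-- two strictly sorted lists with the same members are equal
theorem pv_eq_of_pairwise_lt_ext : ∀ (l₁ l₂ : List (Int × Int)),
    l₁.Pairwise pvLt → l₂.Pairwise pvLt → (∀ a, a ∈ l₁ ↔ a ∈ l₂) → l₁ = l₂ := by
  intro l₁
  induction l₁ with
  | nil =>
    intro l₂ _ _ hiff
    cases l₂ with
    | nil => rfl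
    | cons b t => exact absurd ((hiff b).mpr List.mem_cons_self) (by simp)
  | cons a t₁ ih =>
    intro l₂ h₁ h₂ hiff
    cases l₂ with
    | nil => exact absurd ((hiff a).mp List.mem_cons_self) (by simp)
    | cons b t₂ =>
      rw [List.pairwise_cons] at h₁ h₂
      have hab : a = b := by
        rcases List.mem_cons.mp ((hiff a).mp List.mem_cons_self) with h | h
        · exact h
        · rcases List.mem_cons.mp ((hiff b).mpr List.mem_cons_self) with h' | h'
          · exact h'.symm
          · exact absurd (h₂.1 a h) (pvLt_asymm (h₁.1 b h'))
      subst hab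
      have htiff : ∀ x, x ∈ t₁ ↔ x ∈ t₂ := by
        intro x
        constructor
        · intro hx
          rcases List.mem_cons.mp ((hiff x).mp (List.mem_cons_of_mem a hx)) with rfl | h
          · exact absurd (h₁.1 x hx) (pvLt_irrefl x)
          · exact h
        · intro hx
          rcases List.mem_cons.mp ((hiff x).mpr (List.mem_cons_of_mem a hx)) with rfl | h
          · exact absurd (h₂.1 x hx) (pvLt_irrefl x)
          · exact h
      rw [ih t₂ h₁.2 h₂.2 htiff]

-- A's candidate lists after sorting, as literals
def pvL16 : List (List (Int × Int)) :=
  [ [],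
    [(0, 1)],
    [(1, 0)],
    [(0, 1), (1, 0)],
    [(0, 0)],
    [(1, 1)],
    [(0, 0), (0, 1)],
    [(0, 0), (1, 0)],
    [(0, 0), (0, 1), (1, 0)],
    [(0, 1), (1, 1)],
    [(1, 0), (1, 1)],
    [(0, 1), (1, 0), (1, 1)],
    [(0, 0), (1, 1)],
    [(0, 0), (0, 1), (1, 1)],
    [(0, 0), (1, 0), (1, 1)],
    [(0, 0), (0, 1), (1, 0), (1, 1)] ]

theorem A_eq (xs : List (Int × Int)) :
    isExpectedEdgeSet xs =
      pvL16.any (fun l => l == PySem.List.sorted2 xs (fun p => p.1) (fun p => p.2) false) := by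
  have hmap :
      ([ [],
        [((0:Int), (1:Int))],
        [(1, 0)],
        [(0, 1), (1, 0)],
        [(0, 0)],
        [(1, 1)],
        [(0, 0), (0, 1)],
        [(0, 0), (1, 0)],
        [(0, 0), (0, 1), (1, 0)],
        [(1, 1), (0, 1)],
        [(1, 1), (1, 0)],
        [(1, 1), (0, 1), (1, 0)],
        [(0, 0), (1, 1)],
        [(0, 0), (1, 1), (0, 1)],
        [(0, 0), (1, 1), (1, 0)],
        [(0, 0), (1, 1), (0, 1), (1, 0)] ] : List (List (Int × Int))).map
        (fun edge_set => PySem.List.sorted2 edge_set (fun p => p.1) (fun p => p.2) false)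
        = pvL16 := by decide
  simp only [isExpectedEdgeSet]
  rw [hmap]

-- the crux: on a sorted list, B's scan agrees with A's 16-way membership test
theorem key (s : List (Int × Int)) (hle : s.Pairwise (fun a b => ¬ pvLt b a)) :
    pvL16.any (fun l => l == s) = pvScan none s := by
  cases hscan : pvScan none s with
  | true =>
    have hlt : s.Pairwise pvLt := scan_pairwise s hle hscan
    have hmem : ∀ e ∈ s, e ∈ pvValidEdges := by
      cases s with
      | nil => intro e he; simp at he
      | cons x t =>
        intro e he
        rw [pvScan] at hscan
        by_cases hc : (!(pvValidEdges.contains x) || (some x == (none : Option (Int × Int)))) = true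
        · rw [if_pos hc] at hscan; exact absurd hscan (by simp)
        · rw [if_neg hc] at hscan
          simp only [Bool.or_eq_true, Bool.not_eq_true', not_or] at hc
          rcases List.mem_cons.mp he with rfl | he'
          · exact List.contains_iff_mem.mp (by simpa using hc.1)
          · exact scan_mem t (some x) hscan e he'
    have hVlt : (pvValidEdges.filter (fun e => decide (e ∈ s))).Pairwise pvLt := by
      refine List.Pairwise.sublist List.filter_sublist ?_
      norm_num [pvValidEdges, pvLt, List.pairwise_cons]
    have hiff : ∀ a, a ∈ s ↔ a ∈ pvValidEdges.filter (fun e => decide (e ∈ s)) := by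
      intro a
      constructor
      · intro ha
        exact List.mem_filter.mpr ⟨hmem a ha, by simpa using ha⟩
      · intro ha
        simpa using (List.mem_filter.mp ha).2
    have hseq : s = pvValidEdges.filter (fun e => decide (e ∈ s)) :=
      pv_eq_of_pairwise_lt_ext s _ hlt hVlt hiff
    by_cases h00 : ((0:Int), (0:Int)) ∈ s <;>
    by_cases h01 : ((0:Int), (1:Int)) ∈ s <;>
    by_cases h10 : ((1:Int), (0:Int)) ∈ s <;>
    by_cases h11 : ((1:Int), (1:Int)) ∈ s <;>
    · simp only [pvValidEdges, List.filter_cons, List.filter_nil, h00, h01, h10, h11,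
        decide_true, decide_false, if_true] at hseq
      rw [hseq]
      decide
  | false =>
    by_contra hany
    rw [Bool.not_eq_false, List.any_eq_true] at hany
    obtain ⟨l, hl, heq⟩ := hany
    have hls : l = s := by simpa using heq
    rw [← hls] at hscan
    fin_cases hl <;> revert hscan <;> decide

theorem main_eq (xs : List (Int × Int)) : isExpectedEdgeSet xs = isExpectedEdgeSet_alt xs := by
  rw [A_eq]
  exact key _ (sorted_pairwise_le xs)

-- ===== VERDICT (by name: the statement is the Claim_ definition above) =====
theorem isExpectedEdgeSet_spec : Claim_equal_isExpectedEdgeSet := by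
  intro xs _
  unfold Spec_isExpectedEdgeSet
  exact main_eq xs
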